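-- pv_equiv track=rewrite | github.com/shubhamsahu03/twitch_ingestion | rank_main.py | build_month_keys
-- ===== SOURCE A (Python) =====
-- def build_month_keys(years: list[int], months: list[str]) -> list[str]:
--     """Return month keys in strict chronological order, e.g. ['2022january', ...].
--
--     Months are sorted by calendar position regardless of the order the user
--     provided them on the CLI (argparse preserves input order, not calendar order).
--     """
--     CALENDAR = [
--         "january", "february", "march", "april", "may", "june",
--         "july", "august", "september", "october", "november", "december",
--     ]
--     ordered_months = sorted(months, key=lambda m: CALENDAR.index(m))
--     keys: list[str] = []
--     for year in sorted(years):
--         for month in ordered_months: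
--             keys.append(f"{year}{month}")
--     return keys
-- ===== SOURCE B (Python) =====
-- def build_month_keys(years: list[int], months: list[str]) -> list[str]:
--     """Bucket-sort variant: one pass drops each month into its calendar slot
--     (no sorted(key=...) call for months), then emit keys by comprehension."""
--     CALENDAR = [
--         "january", "february", "march", "april", "may", "june",
--         "july", "august", "september", "october", "november", "december",
--     ]
--     buckets = [[] for _ in CALENDAR]
--     for month in months:
--         buckets[CALENDAR.index(month)].append(month)
--     ordered = [month for bucket in buckets for month in bucket]
--     return [f"{year}{month}" for year in sorted(years) for month in ordered]
-- ===== Notes on version B (the rewrite author's own statement) =====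
-- stated objective: alternative
-- what changed: B replaces A's sorted(months, key=CALENDAR.index) plus nested append loops by a one-pass bucket sort that drops each month into its fixed calendar slot and then flattens, emitting the keys with flat comprehensions.
import Mathlib
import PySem

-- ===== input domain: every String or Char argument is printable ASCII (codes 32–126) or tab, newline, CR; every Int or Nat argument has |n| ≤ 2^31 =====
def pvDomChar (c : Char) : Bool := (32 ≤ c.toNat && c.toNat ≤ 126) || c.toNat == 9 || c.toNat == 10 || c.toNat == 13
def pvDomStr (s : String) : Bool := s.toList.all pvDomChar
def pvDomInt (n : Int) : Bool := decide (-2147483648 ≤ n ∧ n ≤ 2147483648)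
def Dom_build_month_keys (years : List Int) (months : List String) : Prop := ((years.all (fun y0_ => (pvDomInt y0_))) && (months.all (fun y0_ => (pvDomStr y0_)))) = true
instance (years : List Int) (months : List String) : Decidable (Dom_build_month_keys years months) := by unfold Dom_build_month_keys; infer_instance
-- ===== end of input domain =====

-- B replaces A's sorted(months, key=CALENDAR.index) + nested append loops by a one-pass
-- bucket sort into the fixed 12 calendar slots and flat comprehensions (objective: alternative).

-- ===== PORT A =====
-- the module-local CALENDAR constant (shared by both ports, as both Pythons spell it out)
def pvCalendar : List String :=
  ["january", "february", "march", "april", "may", "june",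
   "july", "august", "september", "october", "november", "december"]

-- key of sorted(months, key=lambda m: CALENDAR.index(m)); CALENDAR.index raises ValueError
-- on a month not in CALENDAR (excluded by Pre_), so the .getD 0 default is never reached there
def pvIdxKey (m : String) : Nat := (PySem.List.index? pvCalendar m).getD 0

def build_month_keys (years : List Int) (months : List String) : List String :=
  let ordered := PySem.List.sorted months pvIdxKey
  (PySem.List.sorted years (fun y => y)).foldl
    (fun keys year =>
      ordered.foldl (fun keys month => keys ++ [PySem.Int.toStr year ++ month]) keys)
    []

-- ===== PORT B =====
def build_month_keys_alt (years : List Int) (months : List String) : List String :=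
  -- buckets = [[] for _ in CALENDAR]; for month in months: buckets[CALENDAR.index(month)].append(month)
  -- (CALENDAR.index raises ValueError on an unknown month — excluded by Pre_, so .getD 0 is never reached there)
  let buckets := months.foldl
    (fun bs month => bs.modify (pvIdxKey month) (fun b => b ++ [month]))
    (List.replicate pvCalendar.length ([] : List String))
  -- ordered = [month for bucket in buckets for month in bucket]
  let ordered := buckets.flatten
  (PySem.List.sorted years (fun y => y)).flatMap
    (fun year => ordered.map (fun month => PySem.Int.toStr year ++ month))

-- ===== PRECONDITION & SPEC =====
-- Pre_ excludes exactly the inputs on which A's CALENDAR.index(m) raises ValueError: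
-- some month string not among the twelve calendar names.
def Pre_build_month_keys (years : List Int) (months : List String) : Prop :=
  ∀ m ∈ months, m ∈ pvCalendar
instance (years : List Int) (months : List String) : Decidable (Pre_build_month_keys years months) := by unfold Pre_build_month_keys; infer_instance

def pvWitness_build_month_keys : List Int × List String :=
  ([2022, 2021], ["march", "january", "march"])

def Spec_build_month_keys (years : List Int) (months : List String) (out : List String) : Prop := out = build_month_keys_alt years months
instance (years : List Int) (months : List String) (out : List String) : Decidable (Spec_build_month_keys years months out) := by unfold Spec_build_month_keys; infer_instance

-- ===== CLAIM (what is proved, stated in full; the proofs are below) =====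
def Claim_equal_build_month_keys : Prop := ∀ (years : List Int) (months : List String), Dom_build_month_keys years months → Pre_build_month_keys years months → Spec_build_month_keys years months (build_month_keys years months)

-- ===== LEMMAS AND PROOFS =====

-- the count of c after consuming one more element x
theorem count_bump (f : String → Nat) (x c : String) (t : List String) :
    (if c = x then f c + 1 else f c) + t.count c = f c + (x :: t).count c := by
  rw [List.count_cons]
  by_cases h : c = x
  · simp [h]; omega
  · have hxc : ¬ x = c := fun he => h he.symm
    simp [h, hxc]

-- inserting x in front of a list it is strictly before
theorem insertBy_front {α : Type} (bf : α → α → Bool) (x : α) (ys : List α)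
    (h : ∀ y ∈ ys, bf x y = true) :
    PySem.List.insertBy bf x ys = x :: ys := by
  cases ys with
  | nil => rfl
  | cons y t => simp [PySem.List.insertBy, h y (by simp)]

-- skipping a homogeneous block the element is not before
theorem insertBy_skip_replicate {α : Type} (bf : α → α → Bool) (x c : α) (n : Nat)
    (rest : List α) (h : bf x c = false) :
    PySem.List.insertBy bf x (List.replicate n c ++ rest)
      = List.replicate n c ++ PySem.List.insertBy bf x rest := by
  induction n with
  | zero => simp
  | succ k ih => simp [List.replicate_succ, PySem.List.insertBy, h, ih]

-- one insertion step into the counting shape: the block of x grows by one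
theorem insertBy_counting (key : String → Nat) (cal : List String)
    (hcal : cal.Pairwise (fun a b => key a < key b)) (x : String) (hx : x ∈ cal)
    (f : String → Nat) :
    PySem.List.insertBy (fun a b => decide (key a < key b)) x
        (cal.flatMap fun c => List.replicate (f c) c)
      = cal.flatMap fun c => List.replicate (if c = x then f c + 1 else f c) c := by
  induction cal with
  | nil => simp at hx
  | cons c cs ih =>
    rcases List.pairwise_cons.mp hcal with ⟨hlt, hcs⟩
    by_cases hxc : x = c
    · subst hxc
      have hskip : (decide (key x < key x) : Bool) = false := by simp
      rw [List.flatMap_cons, insertBy_skip_replicate _ _ _ _ _ hskip,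
          insertBy_front _ _ _ (by
            intro y hy
            rcases List.mem_flatMap.mp hy with ⟨c', hc', hy'⟩
            have : y = c' := List.eq_of_mem_replicate hy'
            subst this
            simpa using hlt y hc')]
      have hnot : ∀ c' ∈ cs, ¬ (c' = x) := by
        intro c' hc' he; subst he; exact lt_irrefl _ (hlt c' hc')
      rw [List.flatMap_cons]
      have : (cs.flatMap fun c => List.replicate (if c = x then f c + 1 else f c) c)
          = cs.flatMap fun c => List.replicate (f c) c := by
        apply List.flatMap_congr
        intro c' hc'
        simp [hnot c' hc']
      rw [this, if_pos rfl, List.replicate_succ']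
      simp
    · have hx' : x ∈ cs := by cases List.mem_cons.mp hx with
        | inl h => exact absurd h hxc
        | inr h => exact h
      have hskip : (decide (key x < key c) : Bool) = false := by
        have := hlt x hx'
        simp; omega
      rw [List.flatMap_cons, List.flatMap_cons,
          insertBy_skip_replicate _ _ _ _ _ hskip, ih hcs hx',
          if_neg (fun he => hxc he.symm)]

-- folding all insertions: stable insertion sort of calendar members IS the counting shape
theorem foldl_insertBy_counting (key : String → Nat) (cal : List String)
    (hcal : cal.Pairwise (fun a b => key a < key b)) :
    ∀ (xs : List String), (∀ m ∈ xs, m ∈ cal) → ∀ (f : String → Nat),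
    xs.foldl (fun acc x => PySem.List.insertBy (fun a b => decide (key a < key b)) x acc)
        (cal.flatMap fun c => List.replicate (f c) c)
      = cal.flatMap fun c => List.replicate (f c + xs.count c) c := by
  intro xs
  induction xs with
  | nil => intro _ f; simp
  | cons x t ih =>
    intro hmem f
    rw [List.foldl_cons, insertBy_counting key cal hcal x (hmem x (by simp)) f,
        ih (fun m hm => hmem m (by simp [hm]))]
    apply List.flatMap_congr
    intro c _hc
    rw [count_bump]

-- the calendar is strictly increasing under A's index key
theorem pvCalendar_pairwise : pvCalendar.Pairwise (fun a b => pvIdxKey a < pvIdxKey b) := by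
  decide

-- dropping one month into its bucket of the bucket row
theorem modify_map_buckets (cal : List String) (hnd : cal.Nodup) (m : String) (k : Nat)
    (hk : PySem.List.index? cal m = some k) (f : String → Nat) :
    (cal.map (fun c => List.replicate (f c) c)).modify k (fun b => b ++ [m])
      = cal.map (fun c => List.replicate (if c = m then f c + 1 else f c) c) := by
  induction cal generalizing k with
  | nil => simp [PySem.List.index?] at hk
  | cons c cs ih =>
    rcases List.nodup_cons.mp hnd with ⟨hc, hcs⟩
    by_cases hcm : c = m
    · subst hcm
      rw [PySem.List.index?_cons_self] at hk
      injection hk with hk0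
      subst hk0
      rw [List.map_cons, List.map_cons, List.modify_cons, if_pos rfl, if_pos rfl,
          List.replicate_succ']
      congr 1
      apply List.map_congr_left
      intro c' hc'
      have : ¬ c' = c := fun he => hc (he ▸ hc')
      simp [this]
    · rw [PySem.List.index?_cons_of_ne _ hcm] at hk
      rcases Option.map_eq_some_iff.mp hk with ⟨k', hk', hkk⟩
      subst hkk
      rw [List.map_cons, List.map_cons, List.modify_cons, if_neg (by omega)]
      simp only [Nat.add_sub_cancel]
      rw [ih hcs k' hk', if_neg hcm]

-- folding all months: the bucket row IS the counting shape, bucket by bucket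
theorem foldl_buckets :
    ∀ (xs : List String), (∀ m ∈ xs, m ∈ pvCalendar) → ∀ (f : String → Nat),
    xs.foldl (fun bs month => bs.modify (pvIdxKey month) (fun b => b ++ [month]))
        (pvCalendar.map (fun c => List.replicate (f c) c))
      = pvCalendar.map (fun c => List.replicate (f c + xs.count c) c) := by
  intro xs
  induction xs with
  | nil => intro _ f; simp
  | cons x t ih =>
    intro hmem f
    have hx : x ∈ pvCalendar := hmem x (by simp)
    rcases Option.isSome_iff_exists.mp ((PySem.List.index?_isSome_iff pvCalendar x).mpr hx)
      with ⟨k, hk⟩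
    have hkey : pvIdxKey x = k := by unfold pvIdxKey; rw [hk]; rfl
    rw [List.foldl_cons, hkey, modify_map_buckets pvCalendar (by decide) x k hk f,
        ih (fun m hm => hmem m (by simp [hm]))]
    apply List.map_congr_left
    intro c _hc
    rw [count_bump]

-- A's sorted(months, key=CALENDAR.index) equals B's counting buckets
theorem ordered_eq (months : List String) (h : ∀ m ∈ months, m ∈ pvCalendar) :
    PySem.List.sorted months pvIdxKey
      = pvCalendar.flatMap (fun c => List.replicate (months.count c) c) := by
  rw [PySem.List.sorted_eq_foldl_insertBy]
  have := foldl_insertBy_counting pvIdxKey pvCalendar pvCalendar_pairwise months h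
    (fun _ => 0)
  simpa using this

-- ===== VERDICT (by name: the statement is the Claim_ definition above) =====
theorem build_month_keys_spec : Claim_equal_build_month_keys := by
  intro years months _hdom hpre
  unfold Spec_build_month_keys build_month_keys build_month_keys_alt
  have hinit : List.replicate pvCalendar.length ([] : List String)
      = pvCalendar.map (fun c => List.replicate ((fun _ => 0) c) c) := by
    simp [List.map_const']
  rw [ordered_eq months hpre, hinit, foldl_buckets months hpre (fun _ => 0)]
  simp only [Nat.zero_add]
  rw [show (pvCalendar.map (fun c => List.replicate (months.count c) c)).flatten
        = pvCalendar.flatMap (fun c => List.replicate (months.count c) c) from by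
      simp [List.flatMap]]
  have hfun : (fun (keys : List String) (year : Int) =>
        (pvCalendar.flatMap (fun c => List.replicate (months.count c) c)).foldl
          (fun keys month => keys ++ [PySem.Int.toStr year ++ month]) keys)
      = fun keys year =>
        keys ++ (pvCalendar.flatMap (fun c => List.replicate (months.count c) c)).map
          (fun month => PySem.Int.toStr year ++ month) := by
    funext keys year
    exact PySem.List.foldl_append_singleton_eq_map _ _ _
  show List.foldl _ [] _ = _
  rw [hfun, PySem.List.foldl_append_eq_flatMap]
  simp
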